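-- pv_equiv track=rewrite | github.com/pypi-data/pypi-mirror-369 | packages/abstract-hugpy/abstract_hugpy-0.0.0.40-py3-none-any.whl/abstract_hugpy/get_video_url_bp.py | capitalize_underlines
-- ===== SOURCE A (Python) =====
-- def capitalize(string):
--     if not string:
--         return string
--     if len(string)>1:
--         return f"{string[0].upper()}{string[1:].lower()}"
--     return string.upper()
--
-- def capitalize_underlines(strings):
--     strings = strings.split('_')
--     for i,string in enumerate(strings):
--         string = string.lower()
--         if i >0:
--             string = capitalize(string)
--         strings[i] = string
--     return ''.join(strings)
-- ===== SOURCE B (Python) =====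
-- def capitalize_underlines(strings):
--     first_segment = True
--     start_of_segment = False
--     out = []
--     for ch in strings:
--         if ch == '_':
--             first_segment = False
--             start_of_segment = True
--             continue
--         if first_segment:
--             out.append(ch.lower())
--         elif start_of_segment:
--             out.append(ch.upper())
--         else:
--             out.append(ch.lower())
--         start_of_segment = False
--     return ''.join(out)
-- ===== Notes on version B (the rewrite author's own statement) =====
-- stated objective: alternative
-- what changed: Replaces splitting on underscore into a list plus an indexed segment loop (with slicing/re-lowering per segment) by a single character-by-character pass maintaining two booleans (first-segment, start-of-segment).
import Mathlib
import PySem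

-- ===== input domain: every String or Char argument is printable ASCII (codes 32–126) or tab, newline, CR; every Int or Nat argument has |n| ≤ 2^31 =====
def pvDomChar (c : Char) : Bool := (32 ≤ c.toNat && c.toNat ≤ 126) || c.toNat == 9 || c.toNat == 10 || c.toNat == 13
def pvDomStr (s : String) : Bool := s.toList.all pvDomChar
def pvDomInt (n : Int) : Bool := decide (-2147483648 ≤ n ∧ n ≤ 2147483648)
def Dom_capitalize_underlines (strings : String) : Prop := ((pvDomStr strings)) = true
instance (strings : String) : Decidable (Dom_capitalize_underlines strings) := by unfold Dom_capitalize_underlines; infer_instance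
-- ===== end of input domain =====

-- B replaces A's split-on-underscore segment loop by a single character pass with two booleans; same results, same cost (objective: alternative).

-- ===== PORT A =====
-- port of the module helper `capitalize`
def pyCapitalize (s : List Char) : List Char :=
  if s = [] then s
  else if 1 < s.length then
    PySem.Chars.upper [PySem.List.pyGetD s 0 ' '] ++ PySem.Chars.lower (PySem.Chars.slice s (some 1) none)
  else PySem.Chars.upper s

-- the body of A's for-loop (one list element)
def capUSeg (i : Int) (seg : List Char) : List Char :=
  let s := PySem.Chars.lower seg
  if i > 0 then pyCapitalize s else s

def capitalize_underlines (strings : String) : String :=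
  String.mk (PySem.Chars.join []
    ((PySem.List.enumerate (PySem.Chars.splitOn strings.toList ['_']) 0).map
      (fun p => capUSeg p.1 p.2)))

-- ===== PORT B =====
-- the character loop of Source B: state = (first_segment, start_of_segment)
def altGo : List Char → Bool → Bool → List Char
  | [], _, _ => []
  | c :: rest, firstSeg, startSeg =>
    if c = '_' then altGo rest false true
    else (if firstSeg then PySem.Chars.lowerChar c
          else if startSeg then PySem.Chars.upperChar c
          else PySem.Chars.lowerChar c) :: altGo rest firstSeg false

def capitalize_underlines_alt (strings : String) : String :=
  String.mk (altGo strings.toList true false)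

-- ===== PRECONDITION & SPEC =====
def Spec_capitalize_underlines (strings : String) (out : String) : Prop := out = capitalize_underlines_alt strings
instance (strings : String) (out : String) : Decidable (Spec_capitalize_underlines strings out) := by unfold Spec_capitalize_underlines; infer_instance

-- ===== CLAIM (what is proved, stated in full; the proofs are below) =====
def Claim_equal_capitalize_underlines : Prop := ∀ (strings : String), Dom_capitalize_underlines strings → Spec_capitalize_underlines strings (capitalize_underlines strings)

-- ===== LEMMAS AND PROOFS =====

-- structural recursion equivalent of s.split('_')
def splitU : List Char → List (List Char)
  | [] => [[]]
  | c :: rest => if c = '_' then [] :: splitU rest else (splitU rest).modifyHead (c :: ·)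

-- what A computes on one non-first segment after lowering
def gseg : List Char → List Char
  | [] => []
  | c :: r => PySem.Chars.upperChar c :: PySem.Chars.lower r

def J (segs : List (List Char)) : List Char := PySem.Chars.join [] (segs.map gseg)

theorem modifyHead_id_fun (L : List (List Char)) :
    L.modifyHead (fun x => x) = L := by
  cases L <;> simp

theorem go_spec (l : List Char) : ∀ (fuel : Nat) (cur : List Char) (acc : List (List Char)),
    l.length < fuel →
    PySem.Chars.splitOn.go ['_'] fuel l cur acc
      = acc.reverse ++ (splitU l).modifyHead (fun x => cur.reverse ++ x) := by
  induction l with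
  | nil =>
    intro fuel cur acc h
    cases fuel with
    | zero => omega
    | succ n => simp [PySem.Chars.splitOn.go, splitU, List.modifyHead]
  | cons c rest ih =>
    intro fuel cur acc h
    cases fuel with
    | zero => omega
    | succ n =>
      by_cases hc : c = '_'
      · subst hc
        have hp : (['_'] : List Char).isPrefixOf ('_' :: rest) = true := by
          simp [List.isPrefixOf]
        simp only [PySem.Chars.splitOn.go, hp, if_pos]
        rw [show List.drop (['_'] : List Char).length ('_' :: rest) = rest from rfl]
        rw [ih n [] (cur.reverse :: acc) (by simp at h; omega)]
        simp [splitU]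
        exact modifyHead_id_fun _
      · have hp : (['_'] : List Char).isPrefixOf (c :: rest) = false := by
          simp [List.isPrefixOf]
          intro h'; exact absurd h'.symm hc
        simp only [PySem.Chars.splitOn.go, hp]
        rw [if_neg (by simp)]
        rw [ih n (c :: cur) acc (by simp at h; omega)]
        have : splitU (c :: rest) = (splitU rest).modifyHead (fun x => c :: x) := by
          simp [splitU, hc]
        rw [this, List.modifyHead_modifyHead]
        congr 1
        have hfun : (fun x => (c :: cur).reverse ++ x)
            = ((fun x => cur.reverse ++ x) ∘ (fun x : List Char => c :: x)) := by
          funext x; simp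
        rw [hfun]

theorem splitOn_eq (cs : List Char) : PySem.Chars.splitOn cs ['_'] = splitU cs := by
  unfold PySem.Chars.splitOn
  rw [go_spec cs (cs.length + 1) [] [] (by omega)]
  simp
  exact modifyHead_id_fun _

theorem splitU_ne_nil (cs : List Char) : splitU cs ≠ [] := by
  induction cs with
  | nil => simp [splitU]
  | cons c r ih =>
    unfold splitU
    split
    · simp
    · cases h : splitU r with
      | nil => exact absurd h ih
      | cons a as => simp [List.modifyHead]

theorem join_nil_cons (x : List Char) (xs : List (List Char)) :
    PySem.Chars.join [] (x :: xs) = x ++ PySem.Chars.join [] xs := by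
  cases xs with
  | nil => simp [PySem.Chars.join_singleton, PySem.Chars.join_nil]
  | cons y ys => rw [PySem.Chars.join_cons_cons]; simp

theorem toNat_ofNat_small (n : Nat) (h : n ≤ 1000) : (Char.ofNat n).toNat = n := by
  rw [Char.toNat_ofNat, if_pos]; constructor; omega

theorem isupper_iff (c : Char) : PySem.Chars.isupper c = true ↔ 65 ≤ c.toNat ∧ c.toNat ≤ 90 := by
  simp [PySem.Chars.isupper, Char.le_def, UInt32.le_iff_toNat_le]

theorem islower_iff (c : Char) : PySem.Chars.islower c = true ↔ 97 ≤ c.toNat ∧ c.toNat ≤ 122 := by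
  simp [PySem.Chars.islower, Char.le_def, UInt32.le_iff_toNat_le]

theorem lowerChar_lowerChar (c : Char) :
    PySem.Chars.lowerChar (PySem.Chars.lowerChar c) = PySem.Chars.lowerChar c := by
  unfold PySem.Chars.lowerChar
  by_cases h : PySem.Chars.isupper c = true
  · rw [if_pos h]
    have hb := (isupper_iff c).1 h
    have ht : (Char.ofNat (c.toNat + 32)).toNat = c.toNat + 32 :=
      toNat_ofNat_small _ (by omega)
    rw [if_neg]
    intro hu
    have := (isupper_iff _).1 hu
    rw [ht] at this
    omega
  · rw [if_neg h, if_neg h]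

theorem upperChar_lowerChar (c : Char) :
    PySem.Chars.upperChar (PySem.Chars.lowerChar c) = PySem.Chars.upperChar c := by
  by_cases h : PySem.Chars.isupper c = true
  · have hb := (isupper_iff c).1 h
    have ht : (Char.ofNat (c.toNat + 32)).toNat = c.toNat + 32 :=
      toNat_ofNat_small _ (by omega)
    unfold PySem.Chars.lowerChar
    rw [if_pos h]
    unfold PySem.Chars.upperChar
    rw [if_pos ((islower_iff _).2 (by rw [ht]; omega))]
    rw [if_neg (by intro hl; have := (islower_iff c).1 hl; omega)]
    rw [ht]
    have h32 : c.toNat + 32 - 32 = c.toNat := by omega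
    rw [h32, Char.ofNat_toNat]
  · unfold PySem.Chars.lowerChar
    rw [if_neg h]

theorem slice_one_drop (l : List Char) : PySem.Chars.slice l (some 1) none = l.drop 1 := by
  cases l <;> simp [PySem.Chars.slice_eq_listSlice, PySem.List.slice]

theorem cap_lower (seg : List Char) : pyCapitalize (PySem.Chars.lower seg) = gseg seg := by
  match seg with
  | [] => simp [PySem.Chars.lower, pyCapitalize, gseg]
  | [c] =>
    simp [PySem.Chars.lower, pyCapitalize, gseg, PySem.Chars.upper, upperChar_lowerChar]
  | c :: d :: r =>
    rw [show PySem.Chars.lower (c :: d :: r)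
          = PySem.Chars.lowerChar c :: PySem.Chars.lowerChar d
              :: r.map PySem.Chars.lowerChar from rfl]
    rw [pyCapitalize, if_neg (by simp), if_pos (by simp)]
    rw [slice_one_drop]
    simp only [List.drop_succ_cons, List.drop_zero, PySem.List.pyGetD_zero_cons,
      PySem.Chars.upper, PySem.Chars.lower, List.map_cons, List.map_map, List.map_nil]
    rw [gseg]
    simp [upperChar_lowerChar, lowerChar_lowerChar, PySem.Chars.lower, Function.comp]

theorem mapf_pos (rest : List (List Char)) : ∀ (k : Int), 0 < k →
    (PySem.List.enumerate rest k).map (fun p => capUSeg p.1 p.2) = rest.map gseg := by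
  induction rest with
  | nil => intro k hk; simp [PySem.List.enumerate]
  | cons s t ih =>
    intro k hk
    simp only [PySem.List.enumerate, List.map_cons]
    rw [ih (k + 1) (by omega)]
    congr 1
    unfold capUSeg
    rw [if_pos hk]
    exact cap_lower s

theorem J_cons (x : List Char) (xs : List (List Char)) : J (x :: xs) = gseg x ++ J xs := by
  rw [J, List.map_cons, join_nil_cons]; rfl

theorem main_inv (cs : List Char) :
    (∀ b, altGo cs true b
        = PySem.Chars.lower (splitU cs).head! ++ J (splitU cs).tail)
    ∧ altGo cs false false
        = PySem.Chars.lower (splitU cs).head! ++ J (splitU cs).tail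
    ∧ altGo cs false true = J (splitU cs) := by
  induction cs with
  | nil =>
    refine ⟨fun b => ?_, ?_, ?_⟩ <;>
      simp [altGo, splitU, J, gseg, PySem.Chars.join_nil, PySem.Chars.join_singleton,
        PySem.Chars.lower]
  | cons c r ih =>
    by_cases hc : c = '_'
    · subst hc
      have hs : splitU ('_' :: r) = [] :: splitU r := by simp [splitU]
      have hg : altGo ('_' :: r) = fun _ _ => altGo r false true := by
        funext b1 b2; simp [altGo]
      have hJ : J ([] :: splitU r) = J (splitU r) := by
        rw [J_cons]; simp [gseg]
      refine ⟨fun b => ?_, ?_, ?_⟩ <;>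
        simp [hg, hs, hJ, ih.2.2, PySem.Chars.lower]
    · cases h : splitU r with
      | nil => exact absurd h (splitU_ne_nil r)
      | cons s0 rest =>
        have hs : splitU (c :: r) = (c :: s0) :: rest := by
          simp [splitU, hc, h, List.modifyHead]
        have hL : altGo r true false = PySem.Chars.lower s0 ++ J rest := by
          have := ih.1 false; rw [h] at this; simpa using this
        have hF : altGo r false false = PySem.Chars.lower s0 ++ J rest := by
          have := ih.2.1; rw [h] at this; simpa using this
        refine ⟨fun b => ?_, ?_, ?_⟩
        · rw [show altGo (c :: r) true b
              = PySem.Chars.lowerChar c :: altGo r true false by simp [altGo, hc]]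
          rw [hL, hs]
          simp [PySem.Chars.lower]
        · rw [show altGo (c :: r) false false
              = PySem.Chars.lowerChar c :: altGo r false false by simp [altGo, hc]]
          rw [hF, hs]
          simp [PySem.Chars.lower]
        · rw [show altGo (c :: r) false true
              = PySem.Chars.upperChar c :: altGo r false false by simp [altGo, hc]]
          rw [hF, hs, J_cons]
          simp [gseg]

-- ===== VERDICT (by name: the statement is the Claim_ definition above) =====
theorem capitalize_underlines_spec : Claim_equal_capitalize_underlines := by
  intro s _
  unfold Spec_capitalize_underlines capitalize_underlines capitalize_underlines_alt
  rw [splitOn_eq]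
  cases h : splitU s.toList with
  | nil => exact absurd h (splitU_ne_nil _)
  | cons s0 rest =>
    congr 1
    rw [show PySem.List.enumerate (s0 :: rest) 0
          = (0, s0) :: PySem.List.enumerate rest 1 by simp [PySem.List.enumerate]]
    rw [List.map_cons, mapf_pos rest 1 (by omega)]
    rw [show capUSeg 0 s0 = PySem.Chars.lower s0 by simp [capUSeg]]
    rw [join_nil_cons]
    have := (main_inv s.toList).1 false
    rw [h] at this
    rw [this]
    simp [J]
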